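-- pv_equiv track=rewrite | github.com/harshita310/scam-bait- | app/agents/timeline.py | classify_scam_pattern
-- ===== SOURCE A (Python) =====
-- from typing import List, Dict
--
-- def classify_scam_pattern(phases: List[Dict]) -> str:
--     """
--     Classify the overall scam pattern based on phases detected.
--     """
--
--     phase_names = [p["phase"] for p in phases]
--
--     # Common patterns
--     if "urgency" in phase_names and "authority" in phase_names and "credential_request" in phase_names:
--         return "Classic Bank Fraud"
--
--     if "urgency" in phase_names and "payment_redirection" in phase_names:
--         return "Payment Fraud"
--
--     if "fear" in phase_names and "credential_request" in phase_names:
--         return "Intimidation Fraud"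
--
--     if "authority" in phase_names and "payment_redirection" in phase_names:
--         return "Impersonation Fraud"
--
--     if len(phase_names) >= 4:
--         return "Multi-Stage Scam"
--
--     return "Standard Scam"
-- ===== SOURCE B (Python) =====
-- _BIT = {"urgency": 1, "authority": 2, "credential_request": 4, "payment_redirection": 8, "fear": 16}
--
-- # 32-entry decision table indexed by the bitmask of key phases present;
-- # None means fall back to the phase-count rule.
-- _LABELS = [
--     None, None, None, None,
--     None, None, None, 'Classic Bank Fraud',
--     None, 'Payment Fraud', 'Impersonation Fraud', 'Payment Fraud',
--     None, 'Payment Fraud', 'Impersonation Fraud', 'Classic Bank Fraud',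
--     None, None, None, None,
--     'Intimidation Fraud', 'Intimidation Fraud', 'Intimidation Fraud', 'Classic Bank Fraud',
--     None, 'Payment Fraud', 'Impersonation Fraud', 'Payment Fraud',
--     'Intimidation Fraud', 'Payment Fraud', 'Intimidation Fraud', 'Classic Bank Fraud',
-- ]
--
-- def classify_scam_pattern(phases):
--     mask = 0
--     for p in phases:
--         mask |= _BIT.get(p["phase"], 0)
--     label = _LABELS[mask]
--     if label is not None:
--         return label
--     return "Multi-Stage Scam" if len(phases) >= 4 else "Standard Scam"
-- ===== Notes on version B (the rewrite author's own statement) =====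
-- stated objective: alternative
-- what changed: Replaces A's if-ladder of repeated list-membership tests with a single pass that ORs each phase into a 5-bit presence mask and then decides the label by one lookup in a precomputed 32-entry table.
import Mathlib
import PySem

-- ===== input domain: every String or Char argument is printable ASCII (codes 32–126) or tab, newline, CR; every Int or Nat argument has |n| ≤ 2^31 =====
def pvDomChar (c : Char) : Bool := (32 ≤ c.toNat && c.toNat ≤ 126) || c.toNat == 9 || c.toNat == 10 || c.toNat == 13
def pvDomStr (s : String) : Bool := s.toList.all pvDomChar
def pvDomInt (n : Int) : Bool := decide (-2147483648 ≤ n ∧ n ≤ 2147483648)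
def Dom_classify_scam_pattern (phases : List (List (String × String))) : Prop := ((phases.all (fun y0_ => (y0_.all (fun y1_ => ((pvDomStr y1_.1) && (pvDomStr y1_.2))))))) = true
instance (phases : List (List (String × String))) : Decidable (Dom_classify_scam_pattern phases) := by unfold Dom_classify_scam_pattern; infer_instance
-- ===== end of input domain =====

-- B replaces A's if-ladder of membership tests by a single pass that ORs the phases into a
-- 5-bit mask and a precomputed 32-entry decision table indexed by that mask (alternative decomposition).

-- ===== PORT A =====
def classify_scam_pattern (phases : List (List (String × String))) : String :=
  let phase_names := phases.map (fun p => ((PySem.Dict.mk p).get? "phase").getD "")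
  if phase_names.contains "urgency" && phase_names.contains "authority" && phase_names.contains "credential_request" then
    "Classic Bank Fraud"
  else if phase_names.contains "urgency" && phase_names.contains "payment_redirection" then
    "Payment Fraud"
  else if phase_names.contains "fear" && phase_names.contains "credential_request" then
    "Intimidation Fraud"
  else if phase_names.contains "authority" && phase_names.contains "payment_redirection" then
    "Impersonation Fraud"
  else if phase_names.length ≥ 4 then
    "Multi-Stage Scam"
  else
    "Standard Scam"

-- ===== PORT B =====
-- _BIT.get(name, 0): the bit assigned to each key phase name
def csp_bit (name : String) : Nat :=
  if name = "urgency" then 1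
  else if name = "authority" then 2
  else if name = "credential_request" then 4
  else if name = "payment_redirection" then 8
  else if name = "fear" then 16
  else 0

-- _LABELS: 32-entry decision table indexed by the mask; none = fall back to the count rule
def csp_labels : List (Option String) :=
  [ none, none, none, none,
    none, none, none, some "Classic Bank Fraud",
    none, some "Payment Fraud", some "Impersonation Fraud", some "Payment Fraud",
    none, some "Payment Fraud", some "Impersonation Fraud", some "Classic Bank Fraud",
    none, none, none, none,
    some "Intimidation Fraud", some "Intimidation Fraud", some "Intimidation Fraud", some "Classic Bank Fraud",
    none, some "Payment Fraud", some "Impersonation Fraud", some "Payment Fraud",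
    some "Intimidation Fraud", some "Payment Fraud", some "Intimidation Fraud", some "Classic Bank Fraud" ]

def classify_scam_pattern_alt (phases : List (List (String × String))) : String :=
  let mask := phases.foldl (fun m p => m ||| csp_bit (((PySem.Dict.mk p).get? "phase").getD "")) 0
  -- _LABELS[mask]: mask < 32 always, so plain indexing never raises; getD is exact here
  match csp_labels.getD mask none with
  | some label => label
  | none => if phases.length ≥ 4 then "Multi-Stage Scam" else "Standard Scam"

-- ===== PRECONDITION & SPEC =====
-- Pre_ excludes inputs where some phase dict lacks the "phase" key: there Python A raises KeyError.
def Pre_classify_scam_pattern (phases : List (List (String × String))) : Prop :=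
  ∀ p ∈ phases, ((PySem.Dict.mk p).get? "phase").isSome = true
instance (phases : List (List (String × String))) : Decidable (Pre_classify_scam_pattern phases) := by unfold Pre_classify_scam_pattern; infer_instance
def pvWitness_classify_scam_pattern : (List (List (String × String))) :=
  [[("phase", "urgency")], [("phase", "payment_redirection")]]

def Spec_classify_scam_pattern (phases : List (List (String × String))) (out : String) : Prop := out = classify_scam_pattern_alt phases
instance (phases : List (List (String × String))) (out : String) : Decidable (Spec_classify_scam_pattern phases out) := by unfold Spec_classify_scam_pattern; infer_instance

-- ===== CLAIM =====
def Claim_equal_classify_scam_pattern : Prop := ∀ (phases : List (List (String × String))), Dom_classify_scam_pattern phases → Pre_classify_scam_pattern phases → Spec_classify_scam_pattern phases (classify_scam_pattern phases)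

-- ===== LEMMAS AND PROOFS =====

-- the mask value determined by which of the five key names occur
def csp_enc (b1 b2 b3 b4 b5 : Bool) : Nat :=
  (cond b1 1 0) ||| (cond b2 2 0) ||| (cond b3 4 0) ||| (cond b4 8 0) ||| (cond b5 16 0)

theorem csp_fold_enc (names : List String) (acc : Nat) :
    names.foldl (fun m n => m ||| csp_bit n) acc
      = acc ||| csp_enc (names.contains "urgency") (names.contains "authority")
          (names.contains "credential_request") (names.contains "payment_redirection")
          (names.contains "fear") := by
  induction names generalizing acc with
  | nil => simp [csp_enc]
  | cons n t ih =>
    simp only [List.foldl_cons, ih, List.contains_cons, Nat.or_assoc]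
    congr 1
    generalize (t.contains "urgency") = c1
    generalize (t.contains "authority") = c2
    generalize (t.contains "credential_request") = c3
    generalize (t.contains "payment_redirection") = c4
    generalize (t.contains "fear") = c5
    by_cases h1 : "urgency" = n
    · subst h1; cases c1 <;> cases c2 <;> cases c3 <;> cases c4 <;> cases c5 <;> decide
    by_cases h2 : "authority" = n
    · subst h2; cases c1 <;> cases c2 <;> cases c3 <;> cases c4 <;> cases c5 <;> decide
    by_cases h3 : "credential_request" = n
    · subst h3; cases c1 <;> cases c2 <;> cases c3 <;> cases c4 <;> cases c5 <;> decide
    by_cases h4 : "payment_redirection" = n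
    · subst h4; cases c1 <;> cases c2 <;> cases c3 <;> cases c4 <;> cases c5 <;> decide
    by_cases h5 : "fear" = n
    · subst h5; cases c1 <;> cases c2 <;> cases c3 <;> cases c4 <;> cases c5 <;> decide
    simp [csp_bit, beq_eq_decide, h1, h2, h3, h4, h5, Ne.symm h1, Ne.symm h2, Ne.symm h3, Ne.symm h4, Ne.symm h5]

-- ===== VERDICT =====
set_option maxHeartbeats 2000000 in
theorem classify_scam_pattern_spec : Claim_equal_classify_scam_pattern := by
  intro phases _ _
  unfold Spec_classify_scam_pattern classify_scam_pattern classify_scam_pattern_alt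
  rw [show (phases.foldl (fun m p => m ||| csp_bit (((PySem.Dict.mk p).get? "phase").getD "")) 0)
        = ((phases.map (fun p => ((PySem.Dict.mk p).get? "phase").getD "")).foldl
            (fun m n => m ||| csp_bit n) 0) from by rw [List.foldl_map],
     csp_fold_enc, Nat.zero_or]
  cases hb1 : (phases.map fun p => ((PySem.Dict.mk p).get? "phase").getD "").contains "urgency" <;>
    cases hb2 : (phases.map fun p => ((PySem.Dict.mk p).get? "phase").getD "").contains "authority" <;>
    cases hb3 : (phases.map fun p => ((PySem.Dict.mk p).get? "phase").getD "").contains "credential_request" <;>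
    cases hb4 : (phases.map fun p => ((PySem.Dict.mk p).get? "phase").getD "").contains "payment_redirection" <;>
    cases hb5 : (phases.map fun p => ((PySem.Dict.mk p).get? "phase").getD "").contains "fear" <;>
    simp only [hb1, hb2, hb3, hb4, hb5, List.length_map] <;> rfl
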